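-- pv_equiv track=rewrite | github.com/De-Par/mtp-manager | src/infra/distro.py | _detect_family
-- ===== SOURCE A (Python) =====
-- def _detect_family(distro_id: str, id_like: tuple[str, ...]) -> str:
--     candidates = (distro_id, *id_like)
--     if any(name in {"debian", "ubuntu"} for name in candidates):
--         return "debian"
--     if any(name in {"fedora", "rhel", "centos", "rocky", "almalinux"} for name in candidates):
--         return "fedora"
--     if any(name in {"arch", "archlinux", "manjaro"} for name in candidates):
--         return "arch"
--     return distro_id
-- ===== SOURCE B (Python) =====
-- _FAMILY_MAP = {
--     "debian": "debian", "ubuntu": "debian",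
--     "fedora": "fedora", "rhel": "fedora", "centos": "fedora",
--     "rocky": "fedora", "almalinux": "fedora",
--     "arch": "arch", "archlinux": "arch", "manjaro": "arch",
-- }
--
-- _PRIORITY = ("debian", "fedora", "arch")
--
--
-- def _detect_family(distro_id: str, id_like: tuple[str, ...]) -> str:
--     present = {_FAMILY_MAP[c] for c in (distro_id, *id_like) if c in _FAMILY_MAP}
--     for fam in _PRIORITY:
--         if fam in present:
--             return fam
--     return distro_id
-- ===== Notes on version B (the rewrite author's own statement) =====
-- stated objective: idiomatic
-- what changed: Replaces the three separate any() scans over the candidates with one pass that maps each candidate through a single id-to-family dict into a present-families set, then returns the first family in the fixed priority order.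
import Mathlib
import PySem

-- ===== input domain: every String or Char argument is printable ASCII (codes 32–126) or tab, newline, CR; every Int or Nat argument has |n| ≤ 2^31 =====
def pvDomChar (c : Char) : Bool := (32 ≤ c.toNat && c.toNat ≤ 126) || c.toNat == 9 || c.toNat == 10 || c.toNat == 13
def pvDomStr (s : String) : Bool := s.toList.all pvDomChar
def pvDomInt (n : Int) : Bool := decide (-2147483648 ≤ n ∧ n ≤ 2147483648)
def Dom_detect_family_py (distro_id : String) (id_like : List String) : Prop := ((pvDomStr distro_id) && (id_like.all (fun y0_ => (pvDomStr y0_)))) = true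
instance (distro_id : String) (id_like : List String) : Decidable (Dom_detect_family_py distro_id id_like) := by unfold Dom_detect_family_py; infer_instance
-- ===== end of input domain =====

-- B replaces A's three any() scans with one dict-driven pass collecting the present families,
-- then a lookup in the fixed priority order (objective: idiomatic; same cost).

-- ===== PORT A =====
def detect_family_py (distro_id : String) (id_like : List String) : String :=
  let candidates := distro_id :: id_like
  if candidates.any (fun name => (["debian", "ubuntu"] : List String).contains name) then "debian"
  else if candidates.any (fun name => (["fedora", "rhel", "centos", "rocky", "almalinux"] : List String).contains name) then "fedora"
  else if candidates.any (fun name => (["arch", "archlinux", "manjaro"] : List String).contains name) then "arch"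
  else distro_id

-- ===== PORT B =====
def pvFamilyMap : PySem.Dict String String :=
  PySem.Dict.mk [("debian", "debian"), ("ubuntu", "debian"),
   ("fedora", "fedora"), ("rhel", "fedora"), ("centos", "fedora"),
   ("rocky", "fedora"), ("almalinux", "fedora"),
   ("arch", "arch"), ("archlinux", "arch"), ("manjaro", "arch")]

def pvPriority : List String := ["debian", "fedora", "arch"]

def detect_family_py_alt (distro_id : String) (id_like : List String) : String :=
  let present : PySem.Set String :=
    (distro_id :: id_like).foldl
      (fun s c => match PySem.Dict.get? pvFamilyMap c with
                  | some f => PySem.Set.add s f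
                  | none => s)
      PySem.Set.empty
  match pvPriority.find? (fun fam => present.contains fam) with
  | some fam => fam
  | none => distro_id

-- ===== PRECONDITION & SPEC =====
def Spec_detect_family_py (distro_id : String) (id_like : List String) (out : String) : Prop := out = detect_family_py_alt distro_id id_like
instance (distro_id : String) (id_like : List String) (out : String) : Decidable (Spec_detect_family_py distro_id id_like out) := by unfold Spec_detect_family_py; infer_instance

-- ===== CLAIM (what is proved, stated in full; the proofs are below) =====
def Claim_equal_detect_family_py : Prop := ∀ (distro_id : String) (id_like : List String), Dom_detect_family_py distro_id id_like → Spec_detect_family_py distro_id id_like (detect_family_py distro_id id_like)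

-- ===== LEMMAS AND PROOFS =====

theorem lookup_char (c : String) (f : String) :
    PySem.Dict.get? pvFamilyMap c = some f ↔
      ((f = "debian" ∧ (c = "debian" ∨ c = "ubuntu")) ∨
       (f = "fedora" ∧ (c = "fedora" ∨ c = "rhel" ∨ c = "centos" ∨ c = "rocky" ∨ c = "almalinux")) ∨
       (f = "arch" ∧ (c = "arch" ∨ c = "archlinux" ∨ c = "manjaro"))) := by
  simp only [pvFamilyMap, PySem.Dict.get?_mk_cons]
  by_cases h1 : "debian" = c
  · subst h1; simp [eq_comm]
  by_cases h2 : "ubuntu" = c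
  · subst h2; simp [eq_comm]
  by_cases h3 : "fedora" = c
  · subst h3; simp [eq_comm]
  by_cases h4 : "rhel" = c
  · subst h4; simp [eq_comm]
  by_cases h5 : "centos" = c
  · subst h5; simp [eq_comm]
  by_cases h6 : "rocky" = c
  · subst h6; simp [eq_comm]
  by_cases h7 : "almalinux" = c
  · subst h7; simp [eq_comm]
  by_cases h8 : "arch" = c
  · subst h8; simp [eq_comm]
  by_cases h9 : "archlinux" = c
  · subst h9; simp [eq_comm]
  by_cases h10 : "manjaro" = c
  · subst h10; simp [eq_comm]
  · simp [h1, h2, h3, h4, h5, h6, h7, h8, h9, h10, Ne.symm h1, Ne.symm h2, Ne.symm h3, Ne.symm h4, Ne.symm h5, Ne.symm h6, Ne.symm h7, Ne.symm h8, Ne.symm h9, Ne.symm h10, PySem.Dict.get?]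

theorem mem_present (cs : List String) (s : List String) (x : String) :
    x ∈ cs.foldl
      (fun s c => match PySem.Dict.get? pvFamilyMap c with
                  | some f => PySem.Set.add s f
                  | none => s) s ↔
    x ∈ s ∨ ∃ c ∈ cs, PySem.Dict.get? pvFamilyMap c = some x := by
  induction cs generalizing s with
  | nil => simp
  | cons hd tl ih =>
    simp only [List.foldl_cons]
    cases hget : PySem.Dict.get? pvFamilyMap hd with
    | none =>
      simp only [ih]
      constructor
      · rintro (h | ⟨c, hc, hlc⟩)
        · exact Or.inl h
        · exact Or.inr ⟨c, List.mem_cons_of_mem _ hc, hlc⟩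
      · rintro (h | ⟨c, hc, hlc⟩)
        · exact Or.inl h
        · rcases List.mem_cons.mp hc with rfl | hc
          · simp [hget] at hlc
          · exact Or.inr ⟨c, hc, hlc⟩
    | some f =>
      simp only [ih, PySem.Set.mem_add]
      constructor
      · rintro ((h | rfl) | ⟨c, hc, hlc⟩)
        · exact Or.inl h
        · exact Or.inr ⟨hd, List.mem_cons_self, hget⟩
        · exact Or.inr ⟨c, List.mem_cons_of_mem _ hc, hlc⟩
      · rintro (h | ⟨c, hc, hlc⟩)
        · exact Or.inl (Or.inl h)
        · rcases List.mem_cons.mp hc with rfl | hc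
          · rw [hget] at hlc; exact Or.inl (Or.inr (Option.some.injEq _ _ ▸ hlc.symm ▸ rfl))
          · exact Or.inr ⟨c, hc, hlc⟩
  
-- ===== VERDICT (by name: the statement is the Claim_ definition above) =====
theorem detect_family_py_spec : Claim_equal_detect_family_py := by
  intro distro_id id_like _
  unfold Spec_detect_family_py detect_family_py detect_family_py_alt
  set cs := distro_id :: id_like with hcs
  set pres := cs.foldl
      (fun s c => match PySem.Dict.get? pvFamilyMap c with
                  | some f => PySem.Set.add s f
                  | none => s) PySem.Set.empty with hpres
  have key : ∀ f : String, pres.contains f = true ↔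
      ∃ c ∈ cs, PySem.Dict.get? pvFamilyMap c = some f := by
    intro f
    rw [hpres, PySem.Set.contains_iff, mem_present]
    simp [PySem.Set.empty]
  have hdeb : pres.contains "debian" =
      cs.any (fun name => (["debian", "ubuntu"] : List String).contains name) := by
    rw [Bool.eq_iff_iff, key, List.any_eq_true]
    simp [lookup_char]
  have hfed : pres.contains "fedora" =
      cs.any (fun name => (["fedora", "rhel", "centos", "rocky", "almalinux"] : List String).contains name) := by
    rw [Bool.eq_iff_iff, key, List.any_eq_true]
    simp [lookup_char]
  have har : pres.contains "arch" =
      cs.any (fun name => (["arch", "archlinux", "manjaro"] : List String).contains name) := by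
    rw [Bool.eq_iff_iff, key, List.any_eq_true]
    simp [lookup_char]
  cases hd : cs.any (fun name => (["debian", "ubuntu"] : List String).contains name) <;>
  cases hf : cs.any (fun name => (["fedora", "rhel", "centos", "rocky", "almalinux"] : List String).contains name) <;>
  cases ha : cs.any (fun name => (["arch", "archlinux", "manjaro"] : List String).contains name) <;>
  simp only [pvPriority, List.find?, hdeb, hfed, har, hd, hf, ha] <;> simp
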